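-- pv_equiv track=rewrite | github.com/Extrieve/HackerRank-Python | anagram_delete.py | make_ana
-- ===== SOURCE A (Python) =====
-- def make_ana(a, b):
--     lowercase = "abcdefghijklmnopqrstuvwxyz"
--     a_frequencies = [0] * 26
--     b_frequencies = [0] * 26
--     for i in range(len(a)):
--         if a[i] in lowercase:
--             index = lowercase.index(a[i])
--             a_frequencies[index] += 1
--
--     for i in range(len(b)):
--         if b[i] in lowercase:
--             index = lowercase.index(b[i])
--             b_frequencies[index] += 1
--
--     diff = [abs(x - y) for x, y in zip(a_frequencies, b_frequencies) if abs(x - y) > 0]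
--
--     return sum(diff)
-- ===== SOURCE B (Python) =====
-- def make_ana(a, b):
--     total = 0
--     for c in "abcdefghijklmnopqrstuvwxyz":
--         ca = sum(1 for x in a if x == c)
--         cb = sum(1 for x in b if x == c)
--         total += abs(ca - cb)
--     return total
-- ===== Notes on version B (the rewrite author's own statement) =====
-- stated objective: simpler
-- what changed: Replaces the 26-slot frequency arrays built by indexing with lowercase.index, the zip and the filtered comprehension by a direct per-letter loop that counts each of the 26 letters in both strings and accumulates the absolute difference.
import Mathlib
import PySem

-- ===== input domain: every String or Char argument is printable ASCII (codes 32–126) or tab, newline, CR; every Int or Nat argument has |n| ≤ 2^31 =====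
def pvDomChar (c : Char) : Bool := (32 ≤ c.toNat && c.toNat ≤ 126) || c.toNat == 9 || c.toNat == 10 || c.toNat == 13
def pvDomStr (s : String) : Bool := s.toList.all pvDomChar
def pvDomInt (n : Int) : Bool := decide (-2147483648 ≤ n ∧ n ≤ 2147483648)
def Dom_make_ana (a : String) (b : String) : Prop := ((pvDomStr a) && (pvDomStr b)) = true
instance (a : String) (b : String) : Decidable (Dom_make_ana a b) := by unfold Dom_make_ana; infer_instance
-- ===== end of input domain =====

-- B replaces the frequency arrays / zip / filtered comprehension by a direct per-letter count loop; return value only, no side effects.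

-- ===== PORT A =====
def pvLower : List Char := "abcdefghijklmnopqrstuvwxyz".toList

-- body of 'if a[i] in lowercase: index = lowercase.index(a[i]); freq[index] += 1'
-- (the 'none' branch of index? is unreachable: the membership test guards it)
def pvStepA (fr : List Int) (c : Char) : List Int :=
  if PySem.Chars.isIn [c] pvLower then
    match PySem.List.index? pvLower c with
    | some idx => fr.set idx (fr.getD idx 0 + 1)
    | none => fr
  else fr

-- 'for i in range(len(s)): …' over s with frequency accumulator
def pvFreqLoop (s : List Char) (fr : List Int) : List Int :=
  (PySem.List.pyRange 0 (s.length : Int) 1).foldl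
    (fun fr i =>
      match PySem.List.pyGet? s i with
      | some c => pvStepA fr c
      | none => fr) fr

def make_ana (a : String) (b : String) : Int :=
  let a_frequencies := pvFreqLoop a.toList (List.replicate 26 0)
  let b_frequencies := pvFreqLoop b.toList (List.replicate 26 0)
  let diff := ((a_frequencies.zip b_frequencies).map (fun p => |p.1 - p.2|)).filter
      (fun x => decide (x > 0))
  diff.sum

-- ===== PORT B =====
-- 'sum(1 for x in s if x == c)'
def pvCountB (s : List Char) (c : Char) : Int :=
  s.foldl (fun n x => if x == c then n + 1 else n) 0

def make_ana_alt (a : String) (b : String) : Int :=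
  "abcdefghijklmnopqrstuvwxyz".toList.foldl
    (fun total c => total + |pvCountB a.toList c - pvCountB b.toList c|) 0

-- ===== PRECONDITION & SPEC =====
def Spec_make_ana (a : String) (b : String) (out : Int) : Prop := out = make_ana_alt a b
instance (a : String) (b : String) (out : Int) : Decidable (Spec_make_ana a b out) := by unfold Spec_make_ana; infer_instance

-- ===== CLAIM (what is proved, stated in full; the proofs are below) =====
def Claim_equal_make_ana : Prop := ∀ (a : String) (b : String), Dom_make_ana a b → Spec_make_ana a b (make_ana a b)

-- ===== LEMMAS AND PROOFS =====

-- the index loop over range(len(s)) is a fold of the step over the characters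
lemma pvLower_len : pvLower.length = 26 := by decide

lemma pvFreqLoop_eq_foldl (s : List Char) (fr : List Int) :
    pvFreqLoop s fr = s.foldl pvStepA fr := by
  induction s using List.reverseRecOn generalizing fr with
  | nil => simp [pvFreqLoop, PySem.List.pyRange_one_eq_nil]
  | append_singleton t c ih =>
      unfold pvFreqLoop
      have hlen : (((t ++ [c]).length : Nat) : Int) = (t.length : Int) + 1 := by simp
      rw [hlen, PySem.List.pyRange_one_succ_right (by positivity), List.foldl_append,
        List.foldl_append]
      have hpre : (PySem.List.pyRange 0 (t.length : Int) 1).foldl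
          (fun fr i => match PySem.List.pyGet? (t ++ [c]) i with
            | some ch => pvStepA fr ch | none => fr) fr
          = pvFreqLoop t fr := by
        unfold pvFreqLoop
        apply PySem.List.foldl_congr_mem
        intro acc x hx
        have hb := (PySem.List.mem_pyRange_one).mp hx
        obtain ⟨k, rfl⟩ := Int.eq_ofNat_of_zero_le hb.1
        have hk : k < t.length := by exact_mod_cast hb.2
        rw [PySem.List.pyGet?_natCast, PySem.List.pyGet?_natCast,
          List.getElem?_append_left hk]
      rw [hpre, ih]
      simp only [List.foldl_cons, List.foldl_nil, PySem.List.pyGet?_natCast]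
      rw [List.getElem?_concat_length]

lemma pvStepA_length (fr : List Int) (c : Char) : (pvStepA fr c).length = fr.length := by
  unfold pvStepA
  split
  · split <;> simp
  · rfl

lemma pvFoldA_length (s : List Char) (fr : List Int) :
    (s.foldl pvStepA fr).length = fr.length := by
  induction s generalizing fr with
  | nil => rfl
  | cons c t ih => simpa [List.foldl_cons, pvStepA_length] using ih (pvStepA fr c)

lemma pvLower_nodup : pvLower.Nodup := by decide

lemma pvMem_of_isIn (c : Char) (h : PySem.Chars.isIn [c] pvLower = true) : c ∈ pvLower := by
  have h' := (PySem.Chars.isIn_iff_infix [c] pvLower).mp h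
  exact h'.mem (by simp)

lemma pvIsIn_of_mem (c : Char) (h : c ∈ pvLower) : PySem.Chars.isIn [c] pvLower = true := by
  apply (PySem.Chars.isIn_iff_infix [c] pvLower).mpr
  obtain ⟨p, q, hpq⟩ := List.append_of_mem h
  exact ⟨p, q, by simp [hpq]⟩

lemma pvStepA_getD (fr : List Int) (c : Char) (j : Nat) (hj : j < 26) (hlen : fr.length = 26) :
    (pvStepA fr c).getD j 0 = fr.getD j 0 + (if c == pvLower.getD j ' ' then 1 else 0) := by
  have hjl : j < pvLower.length := by rw [pvLower_len]; exact hj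
  have hmemj : pvLower.getD j ' ' ∈ pvLower := by
    rw [List.getD_eq_getElem _ _ hjl]; exact List.getElem_mem _
  unfold pvStepA
  by_cases hc : c ∈ pvLower
  · rw [pvIsIn_of_mem c hc]
    simp only [if_true]
    obtain ⟨idx, hidx⟩ := Option.isSome_iff_exists.mp
      ((PySem.List.index?_isSome_iff pvLower c).mpr hc)
    rw [hidx]
    obtain ⟨hk, hval, -⟩ := PySem.List.getElem_of_index?_eq_some hidx
    have hidxlt : idx < fr.length := by rw [hlen, ← pvLower_len]; exact hk
    by_cases hji : j = idx
    · subst hji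
      rw [List.getD_eq_getElem _ _ (by simpa using hidxlt),
        List.getElem_set_self, List.getD_eq_getElem _ _ hidxlt]
      have hbeq : (c == pvLower.getD j ' ') = true := by
        rw [List.getD_eq_getElem _ _ hjl, ← hval]; simp
      rw [hbeq]
      simp
    · have hne : c ≠ pvLower.getD j ' ' := by
        rw [List.getD_eq_getElem _ _ hjl]
        intro h
        apply hji
        have hgg : pvLower[idx]'hk = pvLower[j]'hjl := by rw [hval, h]
        exact ((List.Nodup.getElem_inj_iff pvLower_nodup).mp hgg).symm
      have hset : (fr.set idx (fr.getD idx 0 + 1)).getD j 0 = fr.getD j 0 := by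
        simp [List.getD_eq_getElem?_getD,
          List.getElem?_set_ne (show idx ≠ j from fun h => hji h.symm)]
      rw [hset]
      have hbeq : (c == pvLower.getD j ' ') = false := beq_eq_false_iff_ne.mpr hne
      rw [hbeq]
      simp
  · have hf : PySem.Chars.isIn [c] pvLower = false := by
      cases h : PySem.Chars.isIn [c] pvLower with
      | false => rfl
      | true => exact absurd (pvMem_of_isIn c h) hc
    rw [hf]
    have hne : c ≠ pvLower.getD j ' ' := fun h => hc (h ▸ hmemj)
    have hbeq : (c == pvLower.getD j ' ') = false := beq_eq_false_iff_ne.mpr hne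
    rw [if_neg (by simp), hbeq]
    simp

lemma pvFoldA_getD (s : List Char) (fr : List Int) (hlen : fr.length = 26) (j : Nat) (hj : j < 26) :
    (s.foldl pvStepA fr).getD j 0 = fr.getD j 0 + (s.count (pvLower.getD j ' ') : Int) := by
  induction s generalizing fr with
  | nil => simp
  | cons c t ih =>
      rw [List.foldl_cons, ih (pvStepA fr c) (by rw [pvStepA_length]; exact hlen),
        pvStepA_getD fr c j hj hlen, List.count_cons]
      push_cast
      ring

lemma pvFoldA_eq_map (s : List Char) :
    s.foldl pvStepA (List.replicate 26 0) = pvLower.map (fun c => (s.count c : Int)) := by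
  have hlen : (s.foldl pvStepA (List.replicate 26 (0:Int))).length = 26 := by
    rw [pvFoldA_length]; simp
  apply List.ext_getElem
  · rw [hlen]; simp [pvLower]
  · intro j h1 h2
    have hj : j < 26 := by rw [hlen] at h1; exact h1
    have hD := pvFoldA_getD s (List.replicate 26 0) (by simp) j hj
    have hjl : j < pvLower.length := by rw [pvLower_len]; exact hj
    have h0 : (List.replicate 26 (0:Int)).getD j 0 = 0 := by
      rw [List.getD_eq_getElem _ _ (by simpa using hj)]
      exact List.getElem_replicate _
    rw [List.getD_eq_getElem _ _ h1, h0, List.getD_eq_getElem pvLower ' ' hjl] at hD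
    rw [hD, List.getElem_map]
    omega

lemma pvSum_filter_pos (l : List Int) (h : ∀ x ∈ l, 0 ≤ x) :
    (l.filter (fun x => decide (x > 0))).sum = l.sum := by
  induction l with
  | nil => rfl
  | cons x t ih =>
      by_cases hx : x > 0
      · simp [hx, ih (fun y hy => h y (by simp [hy]))]
      · have hx0 : x = 0 := le_antisymm (not_lt.mp hx) (h x (by simp))
        simp [hx0, ih (fun y hy => h y (by simp [hy]))]

lemma pvCountB_eq (s : List Char) (c : Char) : pvCountB s c = (s.count c : Int) := by
  unfold pvCountB
  rw [PySem.List.foldl_beq_add_one]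
  simp

-- ===== VERDICT (by name: the statement is the Claim_ definition above) =====
theorem make_ana_spec : Claim_equal_make_ana := by
  intro a b _
  show make_ana a b = make_ana_alt a b
  simp only [make_ana, make_ana_alt]
  rw [pvFreqLoop_eq_foldl, pvFreqLoop_eq_foldl, pvFoldA_eq_map, pvFoldA_eq_map]
  rw [PySem.List.foldl_add]
  have hz : ((pvLower.map (fun c => (a.toList.count c : Int))).zip
      (pvLower.map (fun c => (b.toList.count c : Int)))) =
      pvLower.map (fun c => ((a.toList.count c : Int), (b.toList.count c : Int))) := by
    rw [List.zip_map']
  rw [hz, List.map_map]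
  have : ("abcdefghijklmnopqrstuvwxyz".toList : List Char) = pvLower := rfl
  rw [this]
  rw [pvSum_filter_pos _ (by
    intro x hx
    simp only [List.mem_map, Function.comp] at hx
    obtain ⟨c, _, hc⟩ := hx
    rw [← hc]
    exact abs_nonneg _)]
  rw [zero_add]
  congr 1
  apply List.map_congr_left
  intro c _
  simp [pvCountB_eq, Function.comp]
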